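-- pv_equiv track=rewrite | github.com/boost-devs/coding-test-study | coodingpenguin/simulation/20056_마법사상어와파이어볼.py | magic_fireball
-- ===== SOURCE A (Python) =====
-- from collections import defaultdict
--
-- dirs = [
--     (-1, 0),
--     (-1, 1),
--     (0, 1),
--     (1, 1),
--     (1, 0),
--     (1, -1),
--     (0, -1),
--     (-1, -1),
-- ]  # ↑, ↗, →, ↘, ↓, ↙, ←,
--
-- def move_fireball(n, loc):
--     new_loc = defaultdict(list)  # 새로운 위치별 파이어볼의 정보
--     for r, c in loc:
--         for m, s, d in loc[(r, c)]:
--             nr, nc = (r + s * dirs[d][0]) % n, (c + s * dirs[d][1]) % n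
--             new_loc[(nr, nc)].append((m, s, d))
--     return new_loc
--
-- def check_all_same(fires):
--     sum_dirs = sum([d % 2 for _, __, d in fires])  # 0이면 짝, 1이면 홀
--     # 모두 짝이거나 모두 홀인 경우
--     if sum_dirs in (0, len(fires)):
--         return True
--     return False
--
-- def split_fireball(loc):
--     new_loc = defaultdict(list)  # 새로운 위치별 파이어볼의 정보
--     for (
--         r,
--         c,
--     ) in loc:
--         num_of_fires = len(loc[(r, c)])  # 현재 위치의 파이어볼 개수
--         # 개수가 0이라면
--         if num_of_fires == 0:
--             continue  # 패스한다
--         # 개수가 1이라면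
--         elif num_of_fires == 1:
--             new_loc[(r, c)] = loc[(r, c)]  # 파이어볼을 그대로 가져온다
--         # 개수가 2이상이라면
--         else:
--             nm = sum([m for m, _, __ in loc[(r, c)]]) // 5  # 새로운 질량
--             ns = sum([s for _, s, __ in loc[(r, c)]]) // num_of_fires  # 새로운 속력
--             # 질량이 0이라면
--             if nm == 0:
--                 continue  # 소멸시킨다
--             # 방향이 모두 홀이거나 짝이라면
--             if check_all_same(loc[(r, c)]):
--                 # 0, 2, 4, 6으로 가는 파이어볼을 생성한다
--                 new_loc[(r, c)] = [(nm, ns, d) for d in (0, 2, 4, 6)]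
--             # 아니라면
--             else:
--                 # 1, 3, 5, 7으로 가는 파이어볼을 생성한다
--                 new_loc[(r, c)] = [(nm, ns, d) for d in (1, 3, 5, 7)]
--     return new_loc
--
-- def calculate_total_mass(loc):
--     total_mass = 0  # 총 질량
--     for r, c in loc:
--         for m, _, __ in loc[(r, c)]:
--             total_mass += m
--     return total_mass
--
-- def magic_fireball(n, k, info):
--     loc = defaultdict(list)  # 위치별 파이어볼의 정보
--     for _r, _c, _m, _s, _d in info:
--         loc[(_r - 1, _c - 1)].append((_m, _s, _d))
--     # 다음의 과정을 k번 수행한다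
--     for _ in range(k):
--         loc = move_fireball(n, loc)  # 파이어볼을 이동한다
--         loc = split_fireball(loc)  # 2개 이상의 파이어볼을 분리시킨다
--     # 남아 있는 파이어볼 질량의 합을 구한다
--     return calculate_total_mass(loc)
-- ===== SOURCE B (Python) =====
-- DIRS = [
--     (-1, 0),
--     (-1, 1),
--     (0, 1),
--     (1, 1),
--     (1, 0),
--     (1, -1),
--     (0, -1),
--     (-1, -1),
-- ]
--
--
-- def merge_group(fires):
--     if len(fires) == 1:
--         return fires
--     nm = sum(m for m, _, _ in fires) // 5
--     if nm == 0:
--         return []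
--     ns = sum(s for _, s, _ in fires) // len(fires)
--     odd = sum(d % 2 for _, _, d in fires)
--     ds = (0, 2, 4, 6) if odd in (0, len(fires)) else (1, 3, 5, 7)
--     return [(nm, ns, d) for d in ds]
--
--
-- def magic_fireball(n, k, info):
--     # flat list of (position, fireball) pairs; grouping is done per step by
--     # scanning for the distinct positions and filtering, not by keyed buckets
--     balls = [((r - 1, c - 1), (m, s, d)) for r, c, m, s, d in info]
--     for _ in range(k):
--         moved = []
--         for (r, c), (m, s, d) in balls:
--             dr, dc = DIRS[d]
--             moved.append((((r + s * dr) % n, (c + s * dc) % n), (m, s, d)))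
--         order = []
--         for p, _ in moved:
--             if p not in order:
--                 order.append(p)
--         balls = [(p, f) for p in order
--                  for f in merge_group([f for q, f in moved if q == p])]
--     return sum(m for _, (m, _, _) in balls)
-- ===== Notes on version B (the rewrite author's own statement) =====
-- stated objective: alternative
-- what changed: Replaces the position-keyed defaultdict pipeline (three dict-rebuilding bucket-push passes per step) with a flat list of (position, fireball) pairs: each step maps every ball to its destination, collects the distinct destination cells in first-occurrence order, and rebuilds the list by filtering the moved list per distinct cell and applying the merge rule -- grouping by scan-and-filter with no keyed buckets at all.
import Mathlib
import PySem

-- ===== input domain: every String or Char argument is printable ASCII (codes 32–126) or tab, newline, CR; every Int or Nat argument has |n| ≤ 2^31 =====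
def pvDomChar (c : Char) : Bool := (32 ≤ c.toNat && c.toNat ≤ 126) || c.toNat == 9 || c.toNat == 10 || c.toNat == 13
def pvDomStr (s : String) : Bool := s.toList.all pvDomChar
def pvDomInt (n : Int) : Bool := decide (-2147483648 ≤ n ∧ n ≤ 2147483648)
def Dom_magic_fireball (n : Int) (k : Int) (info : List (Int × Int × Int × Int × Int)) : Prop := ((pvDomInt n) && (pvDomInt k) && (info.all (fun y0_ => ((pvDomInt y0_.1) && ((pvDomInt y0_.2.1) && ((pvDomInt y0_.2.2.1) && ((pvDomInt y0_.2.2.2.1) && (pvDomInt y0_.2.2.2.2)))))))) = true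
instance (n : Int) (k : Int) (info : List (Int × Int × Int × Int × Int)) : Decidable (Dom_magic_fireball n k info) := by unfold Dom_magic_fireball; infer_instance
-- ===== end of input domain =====

-- B replaces A's dict-of-buckets pipeline by a flat (position, fireball) list whose per-step
-- grouping is done by collecting distinct destinations and filtering (alternative decomposition,
-- no keyed buckets); proved to return the same total mass wherever the Python returns.


-- ===== PORT A =====
def dirsA : List (Int × Int) := [(-1, 0), (-1, 1), (0, 1), (1, 1), (1, 0), (1, -1), (0, -1), (-1, -1)]

def moveFireballA (n : Int) (loc : PySem.Dict (Int × Int) (List (Int × Int × Int))) :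
    PySem.Dict (Int × Int) (List (Int × Int × Int)) :=
  loc.keys.foldl (fun newLoc p =>
    (loc.getD p []).foldl (fun newLoc f =>
      let dir := PySem.List.pyGetD dirsA f.2.2 (0, 0)
      newLoc.modify (PySem.Int.mod (p.1 + f.2.1 * dir.1) n, PySem.Int.mod (p.2 + f.2.1 * dir.2) n)
        [] (· ++ [f])) newLoc)
    PySem.Dict.empty

def checkAllSameA (fires : List (Int × Int × Int)) : Bool :=
  let sumDirs := (fires.map (fun f => PySem.Int.mod f.2.2 2)).sum
  sumDirs == 0 || sumDirs == PySem.List.len fires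

def splitFireballA (loc : PySem.Dict (Int × Int) (List (Int × Int × Int))) :
    PySem.Dict (Int × Int) (List (Int × Int × Int)) :=
  loc.keys.foldl (fun newLoc p =>
    let fires := loc.getD p []
    let numOfFires := PySem.List.len fires
    if numOfFires == 0 then newLoc
    else if numOfFires == 1 then newLoc.insert p fires
    else
      let nm := PySem.Int.floordiv ((fires.map (fun f => f.1)).sum) 5
      let ns := PySem.Int.floordiv ((fires.map (fun f => f.2.1)).sum) numOfFires
      if nm == 0 then newLoc
      else if checkAllSameA fires then
        newLoc.insert p (([0, 2, 4, 6] : List Int).map (fun d => (nm, ns, d)))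
      else
        newLoc.insert p (([1, 3, 5, 7] : List Int).map (fun d => (nm, ns, d))))
    PySem.Dict.empty

def calculateTotalMassA (loc : PySem.Dict (Int × Int) (List (Int × Int × Int))) : Int :=
  loc.keys.foldl (fun total p =>
    (loc.getD p []).foldl (fun total f => total + f.1) total) 0

def magic_fireball (n : Int) (k : Int) (info : List (Int × Int × Int × Int × Int)) : Int :=
  let loc0 := info.foldl (fun loc q =>
    loc.modify (q.1 - 1, q.2.1 - 1) [] (· ++ [(q.2.2.1, q.2.2.2.1, q.2.2.2.2)])) PySem.Dict.empty
  let locK := (List.range k.toNat).foldl (fun loc _ => splitFireballA (moveFireballA n loc)) loc0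
  calculateTotalMassA locK

-- ===== PORT B =====
def dirsB : List (Int × Int) := [(-1, 0), (-1, 1), (0, 1), (1, 1), (1, 0), (1, -1), (0, -1), (-1, -1)]

def mergeGroupB (fires : List (Int × Int × Int)) : List (Int × Int × Int) :=
  if PySem.List.len fires == 1 then fires
  else
    let nm := PySem.Int.floordiv ((fires.map (fun f => f.1)).sum) 5
    if nm == 0 then []
    else
      let ns := PySem.Int.floordiv ((fires.map (fun f => f.2.1)).sum) (PySem.List.len fires)
      let odd := (fires.map (fun f => PySem.Int.mod f.2.2 2)).sum
      let ds : List Int :=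
        if odd == 0 || odd == PySem.List.len fires then [0, 2, 4, 6] else [1, 3, 5, 7]
      ds.map (fun d => (nm, ns, d))

def stepB (n : Int) (balls : List ((Int × Int) × (Int × Int × Int))) :
    List ((Int × Int) × (Int × Int × Int)) :=
  let moved := balls.map (fun b =>
    let dir := PySem.List.pyGetD dirsB b.2.2.2 (0, 0)
    ((PySem.Int.mod (b.1.1 + b.2.2.1 * dir.1) n, PySem.Int.mod (b.1.2 + b.2.2.1 * dir.2) n), b.2))
  let order := moved.foldl (fun ord b => if ord.contains b.1 then ord else ord ++ [b.1])
    ([] : List (Int × Int))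
  order.flatMap (fun p =>
    (mergeGroupB ((moved.filter (fun b => b.1 == p)).map (fun b => b.2))).map (fun f => (p, f)))

def magic_fireball_alt (n : Int) (k : Int) (info : List (Int × Int × Int × Int × Int)) : Int :=
  let balls0 := info.map (fun q => ((q.1 - 1, q.2.1 - 1), (q.2.2.1, q.2.2.2.1, q.2.2.2.2)))
  let ballsK := (List.range k.toNat).foldl (fun bs _ => stepB n bs) balls0
  (ballsK.map (fun b => b.2.1)).sum

-- ===== PRECONDITION & SPEC =====
-- Pre_ excludes exactly the inputs on which the Python A raises: a simulated step with at
-- least one fireball needs n ≠ 0 (mod n: ZeroDivisionError) and every initial direction in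
-- [-8, 8) (dirs[d]: IndexError).  (B raises on the same inputs.)
def Pre_magic_fireball (n : Int) (k : Int) (info : List (Int × Int × Int × Int × Int)) : Prop :=
  k ≤ 0 ∨ info = [] ∨ (n ≠ 0 ∧ ∀ q ∈ info, -8 ≤ q.2.2.2.2 ∧ q.2.2.2.2 < 8)
instance (n : Int) (k : Int) (info : List (Int × Int × Int × Int × Int)) : Decidable (Pre_magic_fireball n k info) := by unfold Pre_magic_fireball; infer_instance

def pvWitness_magic_fireball : Int × Int × (List (Int × Int × Int × Int × Int)) :=
  (4, 2, [(1, 1, 5, 2, 2), (1, 3, 7, 1, 6), (3, 3, 9, 1, 1)])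

def Spec_magic_fireball (n : Int) (k : Int) (info : List (Int × Int × Int × Int × Int)) (out : Int) : Prop := out = magic_fireball_alt n k info
instance (n : Int) (k : Int) (info : List (Int × Int × Int × Int × Int)) (out : Int) : Decidable (Spec_magic_fireball n k info out) := by unfold Spec_magic_fireball; infer_instance

-- ===== CLAIM (what is proved, stated in full; the proofs are below) =====
def Claim_equal_magic_fireball : Prop := ∀ (n : Int) (k : Int) (info : List (Int × Int × Int × Int × Int)), Dom_magic_fireball n k info → Pre_magic_fireball n k info → Spec_magic_fireball n k info (magic_fireball n k info)

-- ===== LEMMAS AND PROOFS =====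

-- The moved copy of a located fireball (shared formula of both ports).
def pvMv (n : Int) (b : (Int × Int) × (Int × Int × Int)) : (Int × Int) × (Int × Int × Int) :=
  let dir := PySem.List.pyGetD dirsA b.2.2.2 (0, 0)
  ((PySem.Int.mod (b.1.1 + b.2.2.1 * dir.1) n, PySem.Int.mod (b.1.2 + b.2.2.1 * dir.2) n), b.2)

-- The grouping dict a list of (position, fireball) pairs builds (A's bucket push).
def pvBuild (L : List ((Int × Int) × (Int × Int × Int))) :
    PySem.Dict (Int × Int) (List (Int × Int × Int)) :=
  L.foldl (fun d p => d.modify p.1 [] (· ++ [p.2])) PySem.Dict.empty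

-- All fireballs of a dict, tagged with their positions, in iteration order.
def pvFlatten (d : PySem.Dict (Int × Int) (List (Int × Int × Int))) :
    List ((Int × Int) × (Int × Int × Int)) :=
  d.items.flatMap (fun pv => pv.2.map (fun f => (pv.1, f)))

-- A's per-cell merge rule as a function ([] = cell left empty / annihilated).
def pvMergeA (fires : List (Int × Int × Int)) : List (Int × Int × Int) :=
  if PySem.List.len fires == 0 then []
  else if PySem.List.len fires == 1 then fires
  else
    let nm := PySem.Int.floordiv ((fires.map (fun f => f.1)).sum) 5
    let ns := PySem.Int.floordiv ((fires.map (fun f => f.2.1)).sum) (PySem.List.len fires)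
    if nm == 0 then []
    else if checkAllSameA fires then ([0, 2, 4, 6] : List Int).map (fun d => (nm, ns, d))
    else ([1, 3, 5, 7] : List Int).map (fun d => (nm, ns, d))

theorem pv_build_getD (L : List ((Int × Int) × (Int × Int × Int))) (p : Int × Int) :
    (pvBuild L).getD p [] = (L.filter (fun b => b.1 == p)).map (fun b => b.2) := by
  simp [pvBuild, PySem.Dict.getD_foldl_modify_append, PySem.Dict.getD_empty]

theorem pv_build_keys (L : List ((Int × Int) × (Int × Int × Int))) :
    (pvBuild L).keys = PySem.Set.ofList (L.map (fun b => b.1)) := by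
  simp [pvBuild, PySem.Dict.keys_foldl_modify_key, PySem.Dict.keys_empty,
    PySem.Set.update_nil_left]

theorem pv_repair (L : List ((Int × Int) × (Int × Int × Int))) (p : Int × Int) :
    ((L.filter (fun b => b.1 == p)).map (fun b => b.2)).map (fun f => (p, f))
      = L.filter (fun b => b.1 == p) := by
  induction L with
  | nil => rfl
  | cons b t ih =>
    by_cases hb : b.1 = p
    · simp [hb, ih]
      exact (Prod.ext hb.symm rfl)
    · simp [hb, ih]

theorem pv_partition (ks : List (Int × Int)) (L : List ((Int × Int) × (Int × Int × Int)))
    (hnd : ks.Nodup) (hcov : ∀ b ∈ L, b.1 ∈ ks) :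
    (ks.flatMap (fun p => L.filter (fun b => b.1 == p))).Perm L := by
  induction ks generalizing L with
  | nil =>
    have : L = [] := by
      cases L with
      | nil => rfl
      | cons b t => exact absurd (hcov b (by simp)) (by simp)
    simp [this]
  | cons p t ih =>
    have hrest : t.flatMap (fun q => L.filter (fun b => b.1 == q))
        = t.flatMap (fun q => (L.filter (fun b => !(b.1 == p))).filter (fun b => b.1 == q)) := by
      apply List.flatMap_congr
      intro q hq
      rw [List.filter_filter]
      apply List.filter_congr
      intro b hb
      have hqp : q ≠ p := fun h => (List.nodup_cons.mp hnd).1 (h ▸ hq)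
      by_cases hbq : b.1 = q
      · simp [hbq, hqp]
      · simp [hbq]
    have hcov' : ∀ b ∈ L.filter (fun b => !(b.1 == p)), b.1 ∈ t := by
      intro b hb
      have hm := List.mem_filter.mp hb
      have := hcov b hm.1
      simp at this hm ⊢
      rcases this with h | h
      · exact absurd h hm.2
      · exact h
    have ihp := ih (L.filter (fun b => !(b.1 == p))) (List.nodup_cons.mp hnd).2 hcov'
    rw [List.flatMap_cons, hrest]
    exact (List.Perm.append_left _ ihp).trans (List.filter_append_perm _ L)

theorem pv_flatten_build (L : List ((Int × Int) × (Int × Int × Int))) :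
    (pvFlatten (pvBuild L)).Perm L := by
  have hnd : (pvBuild L).keys.Nodup := by
    rw [pv_build_keys]; exact PySem.Set.nodup_ofList _
  unfold pvFlatten
  rw [PySem.Dict.items_eq_map_keys (pvBuild L) hnd [], List.flatMap_map]
  have hpt : ∀ k, ((pvBuild L).getD k []).map (fun f => (k, f)) = L.filter (fun b => b.1 == k) := by
    intro k; rw [pv_build_getD]; exact pv_repair L k
  simp only [hpt]
  rw [pv_build_keys]
  exact pv_partition _ L (PySem.Set.nodup_ofList _)
    (fun b hb => (PySem.Set.mem_ofList _ _).mpr (List.mem_map_of_mem hb))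

theorem pv_move_eq (n : Int) (loc : PySem.Dict (Int × Int) (List (Int × Int × Int)))
    (hnd : loc.keys.Nodup) :
    moveFireballA n loc = pvBuild ((pvFlatten loc).map (pvMv n)) := by
  unfold moveFireballA pvBuild pvFlatten
  rw [PySem.Dict.items_eq_map_keys loc hnd [], List.flatMap_map, List.foldl_map,
    List.foldl_flatMap]
  simp only [List.foldl_map, pvMv]

-- a fold of conditional inserts at fresh distinct keys appends its items
theorem pv_fold_insert_items (ks : List (Int × Int))
    (v : (Int × Int) → List (Int × Int × Int)) :
    ∀ (d0 : PySem.Dict (Int × Int) (List (Int × Int × Int))), ks.Nodup →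
      (∀ p ∈ ks, d0.contains p = false) →
      (ks.foldl (fun nd p => if v p == [] then nd else nd.insert p (v p)) d0).items
        = d0.items ++ (ks.filter (fun p => !(v p == []))).map (fun p => (p, v p)) := by
  induction ks with
  | nil => intro d0 _ _; simp
  | cons p t ih =>
    intro d0 hnd h0
    rw [List.foldl_cons]
    by_cases hv : (v p == []) = true
    · rw [if_pos hv]
      rw [ih d0 (List.nodup_cons.mp hnd).2 (fun q hq => h0 q (by simp [hq]))]
      simp [show v p = [] from by simpa using hv]
    · rw [if_neg (by simp_all)]
      have hfresh : d0.contains p = false := h0 p (by simp)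
      have hcont : ∀ q ∈ t, (d0.insert p (v p)).contains q = false := by
        intro q hq
        rw [PySem.Dict.contains_insert]
        have hqp : (q == p) = false := by
          have : q ≠ p := fun h => (List.nodup_cons.mp hnd).1 (h ▸ hq)
          simp [this]
        rw [hqp, h0 q (by simp [hq])]
        rfl
      rw [ih (d0.insert p (v p)) (List.nodup_cons.mp hnd).2 hcont,
        PySem.Dict.items_insert_of_not_contains d0 (v p) hfresh]
      simp [show ¬ v p = [] from by simpa using hv]

-- A's split step, as a conditional insert of the merge function's value
theorem pv_split_step (d : PySem.Dict (Int × Int) (List (Int × Int × Int)))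
    (nd : PySem.Dict (Int × Int) (List (Int × Int × Int))) (p : Int × Int) :
    (let fires := d.getD p []
     let numOfFires := PySem.List.len fires
     if numOfFires == 0 then nd
     else if numOfFires == 1 then nd.insert p fires
     else
       let nm := PySem.Int.floordiv ((fires.map (fun f => f.1)).sum) 5
       let ns := PySem.Int.floordiv ((fires.map (fun f => f.2.1)).sum) numOfFires
       if nm == 0 then nd
       else if checkAllSameA fires then
         nd.insert p (([0, 2, 4, 6] : List Int).map (fun d => (nm, ns, d)))
       else
         nd.insert p (([1, 3, 5, 7] : List Int).map (fun d => (nm, ns, d))))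
      = if pvMergeA (d.getD p []) == [] then nd
        else nd.insert p (pvMergeA (d.getD p [])) := by
  unfold pvMergeA
  cases hf : d.getD p [] with
  | nil => simp
  | cons a t =>
    cases t with
    | nil => simp [PySem.List.len_eq]
    | cons b u =>
      simp only [PySem.List.len_eq, List.length_cons]
      split_ifs <;> simp_all

theorem pv_split_items (d : PySem.Dict (Int × Int) (List (Int × Int × Int)))
    (hnd : d.keys.Nodup) :
    (splitFireballA d).items
      = (d.keys.filter (fun p => !(pvMergeA (d.getD p []) == []))).map
          (fun p => (p, pvMergeA (d.getD p []))) := by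
  unfold splitFireballA
  have hstep : (fun (nd : PySem.Dict (Int × Int) (List (Int × Int × Int))) (p : Int × Int) =>
      let fires := d.getD p []
      let numOfFires := PySem.List.len fires
      if numOfFires == 0 then nd
      else if numOfFires == 1 then nd.insert p fires
      else
        let nm := PySem.Int.floordiv ((fires.map (fun f => f.1)).sum) 5
        let ns := PySem.Int.floordiv ((fires.map (fun f => f.2.1)).sum) numOfFires
        if nm == 0 then nd
        else if checkAllSameA fires then
          nd.insert p (([0, 2, 4, 6] : List Int).map (fun d => (nm, ns, d)))
        else
          nd.insert p (([1, 3, 5, 7] : List Int).map (fun d => (nm, ns, d))))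
      = (fun nd p => if pvMergeA (d.getD p []) == [] then nd
          else nd.insert p (pvMergeA (d.getD p []))) := by
    funext nd p
    exact pv_split_step d nd p
  rw [hstep, pv_fold_insert_items d.keys (fun p => pvMergeA (d.getD p []))
    PySem.Dict.empty hnd (fun q _ => PySem.Dict.contains_empty q)]
  simp [PySem.Dict.empty]

theorem pv_split_keys_nodup (d : PySem.Dict (Int × Int) (List (Int × Int × Int)))
    (hnd : d.keys.Nodup) : (splitFireballA d).keys.Nodup := by
  have h : (splitFireballA d).keys
      = d.keys.filter (fun p => !(pvMergeA (d.getD p []) == [])) := by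
    simp only [PySem.Dict.keys, pv_split_items d hnd, List.map_map]
    have hid : ((fun x : (Int × Int) × List (Int × Int × Int) => x.1)
        ∘ fun p => (p, pvMergeA (d.getD p []))) = id := rfl
    rw [hid, List.map_id]
  rw [h]
  exact hnd.filter _

theorem pv_flatten_split (d : PySem.Dict (Int × Int) (List (Int × Int × Int)))
    (hnd : d.keys.Nodup) :
    pvFlatten (splitFireballA d)
      = d.keys.flatMap (fun p => (pvMergeA (d.getD p [])).map (fun f => (p, f))) := by
  unfold pvFlatten
  rw [pv_split_items d hnd, List.flatMap_map]
  have : ∀ (ks : List (Int × Int)),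
      (ks.filter (fun p => !(pvMergeA (d.getD p []) == []))).flatMap
          (fun p => (pvMergeA (d.getD p [])).map (fun f => (p, f)))
        = ks.flatMap (fun p => (pvMergeA (d.getD p [])).map (fun f => (p, f))) := by
    intro ks
    induction ks with
    | nil => rfl
    | cons q t ih =>
      rw [List.filter_cons]
      by_cases hq : pvMergeA (d.getD q []) = []
      · rw [if_neg (by simp [hq])]
        rw [List.flatMap_cons, hq, List.map_nil, List.nil_append]
        exact ih
      · rw [if_pos (by simp [hq])]
        rw [List.flatMap_cons, List.flatMap_cons, ih]
  exact this d.keys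

theorem pv_merge_eq (l : List (Int × Int × Int)) : pvMergeA l = mergeGroupB l := by
  unfold pvMergeA mergeGroupB checkAllSameA
  cases l with
  | nil => simp [PySem.List.len_eq, PySem.Int.floordiv]
  | cons a t =>
    cases t with
    | nil => simp [PySem.List.len_eq]
    | cons b u =>
      simp only [PySem.List.len_eq, List.length_cons]
      split_ifs <;> simp_all <;> omega

theorem pv_mergeB_perm (l l' : List (Int × Int × Int)) (h : l.Perm l') :
    mergeGroupB l = mergeGroupB l' := by
  unfold mergeGroupB
  have hlen : PySem.List.len l = PySem.List.len l' := by
    simp [PySem.List.len_eq, h.length_eq]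
  have hm : (l.map (fun f => f.1)).sum = (l'.map (fun f => f.1)).sum :=
    (h.map _).sum_eq
  have hs : (l.map (fun f => f.2.1)).sum = (l'.map (fun f => f.2.1)).sum :=
    (h.map _).sum_eq
  have hd : (l.map (fun f => PySem.Int.mod f.2.2 2)).sum
      = (l'.map (fun f => PySem.Int.mod f.2.2 2)).sum := (h.map _).sum_eq
  rw [hlen, hm, hs, hd]
  by_cases h1 : (PySem.List.len l' == 1) = true
  · rw [if_pos h1, if_pos h1]
    have : l'.length = 1 := by
      have := h1; simp [PySem.List.len_eq] at this; exact_mod_cast this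
    obtain ⟨x, hx⟩ := List.length_eq_one_iff.mp this
    subst hx
    exact List.perm_singleton.mp h
  · rw [if_neg h1, if_neg h1]

theorem pv_stepB_eq (n : Int) (balls : List ((Int × Int) × (Int × Int × Int))) :
    stepB n balls
      = (PySem.Set.ofList ((balls.map (pvMv n)).map (fun b => b.1))).flatMap (fun p =>
          (mergeGroupB (((balls.map (pvMv n)).filter (fun b => b.1 == p)).map (fun b => b.2))).map
            (fun f => (p, f))) := by
  have horder : ∀ (M : List ((Int × Int) × (Int × Int × Int))),
      M.foldl (fun ord b => if ord.contains b.1 then ord else ord ++ [b.1])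
          ([] : List (Int × Int))
        = PySem.Set.ofList (M.map (fun b => b.1)) := by
    intro M
    have hf : (fun (ord : List (Int × Int)) (b : (Int × Int) × (Int × Int × Int)) =>
        if ord.contains b.1 then ord else ord ++ [b.1])
        = (fun ord b => PySem.Set.add ord b.1) := by
      funext ord b
      simp [PySem.Set.add, PySem.Set.contains]
    rw [hf, ← PySem.Set.update_map_eq_foldl_add, PySem.Set.update_nil_left]
  have hmv : (fun (b : (Int × Int) × (Int × Int × Int)) =>
      let dir := PySem.List.pyGetD dirsB b.2.2.2 (0, 0)
      ((PySem.Int.mod (b.1.1 + b.2.2.1 * dir.1) n, PySem.Int.mod (b.1.2 + b.2.2.1 * dir.2) n),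
        b.2)) = pvMv n := rfl
  unfold stepB
  rw [hmv]
  dsimp only
  rw [horder]

theorem pv_mass_eq (loc : PySem.Dict (Int × Int) (List (Int × Int × Int)))
    (hnd : loc.keys.Nodup) :
    calculateTotalMassA loc = ((pvFlatten loc).map (fun b => b.2.1)).sum := by
  unfold calculateTotalMassA
  have hsum : ∀ (L : List ((Int × Int) × (Int × Int × Int))),
      (L.map (fun b => b.2.1)).sum = L.foldl (fun t b => t + b.2.1) 0 := by
    intro L; rw [PySem.List.foldl_add]; simp
  rw [hsum]
  unfold pvFlatten
  rw [PySem.Dict.items_eq_map_keys loc hnd [], List.flatMap_map, List.foldl_flatMap]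
  simp only [List.foldl_map]

-- one simulation step preserves the flat-list view up to permutation
theorem pv_step (n : Int) (loc : PySem.Dict (Int × Int) (List (Int × Int × Int)))
    (balls : List ((Int × Int) × (Int × Int × Int)))
    (hnd : loc.keys.Nodup) (h : (pvFlatten loc).Perm balls) :
    (splitFireballA (moveFireballA n loc)).keys.Nodup ∧
      (pvFlatten (splitFireballA (moveFireballA n loc))).Perm (stepB n balls) := by
  have hM : ((pvFlatten loc).map (pvMv n)).Perm (balls.map (pvMv n)) := h.map (pvMv n)
  have hmove : moveFireballA n loc = pvBuild ((pvFlatten loc).map (pvMv n)) := pv_move_eq n loc hnd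
  have hndM : (pvBuild ((pvFlatten loc).map (pvMv n))).keys.Nodup := by
    rw [pv_build_keys]; exact PySem.Set.nodup_ofList _
  constructor
  · rw [hmove]; exact pv_split_keys_nodup _ hndM
  · rw [hmove, pv_flatten_split _ hndM, pv_build_keys, pv_stepB_eq]
    have hpt : (fun p => (pvMergeA ((pvBuild ((pvFlatten loc).map (pvMv n))).getD p [])).map
          (fun f => (p, f)))
        = (fun p => (mergeGroupB (((balls.map (pvMv n)).filter (fun b => b.1 == p)).map
            (fun b => b.2))).map (fun f => (p, f))) := by
      funext p
      rw [pv_build_getD, pv_merge_eq]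
      rw [pv_mergeB_perm _ _ ((hM.filter _).map _)]
    rw [hpt]
    apply List.Perm.flatMap_right
    apply (List.perm_ext_iff_of_nodup (PySem.Set.nodup_ofList _) (PySem.Set.nodup_ofList _)).mpr
    intro a
    rw [PySem.Set.mem_ofList, PySem.Set.mem_ofList]
    exact (hM.map (fun b => b.1)).mem_iff

-- ===== VERDICT (by name: the statement is the Claim_ definition above) =====
-- the k-step simulation, both sides at once
theorem pv_sim (n : Int) (L0 : List ((Int × Int) × (Int × Int × Int))) : ∀ (t : Nat),
    ((List.range t).foldl (fun loc _ => splitFireballA (moveFireballA n loc)) (pvBuild L0)).keys.Nodup ∧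
      (pvFlatten ((List.range t).foldl (fun loc _ => splitFireballA (moveFireballA n loc)) (pvBuild L0))).Perm
        ((List.range t).foldl (fun bs _ => stepB n bs) L0) := by
  intro t
  induction t with
  | zero =>
    simp only [List.range_zero, List.foldl_nil]
    refine ⟨?_, pv_flatten_build L0⟩
    rw [pv_build_keys]; exact PySem.Set.nodup_ofList _
  | succ t ih =>
    rw [List.range_succ, List.foldl_append, List.foldl_append]
    simp only [List.foldl_cons, List.foldl_nil]
    exact pv_step n _ _ ih.1 ih.2

theorem magic_fireball_spec : Claim_equal_magic_fireball := by
  intro n k info _ _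
  unfold Spec_magic_fireball magic_fireball magic_fireball_alt
  have hinit : info.foldl (fun loc q =>
        loc.modify (q.1 - 1, q.2.1 - 1) [] (· ++ [(q.2.2.1, q.2.2.2.1, q.2.2.2.2)]))
        PySem.Dict.empty
      = pvBuild (info.map (fun q => ((q.1 - 1, q.2.1 - 1), (q.2.2.1, q.2.2.2.1, q.2.2.2.2)))) := by
    rw [pvBuild, List.foldl_map]
  rw [hinit]
  obtain ⟨hnd, hperm⟩ := pv_sim n
    (info.map (fun q => ((q.1 - 1, q.2.1 - 1), (q.2.2.1, q.2.2.2.1, q.2.2.2.2)))) k.toNat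
  rw [pv_mass_eq _ hnd]
  exact (hperm.map (fun b => b.2.1)).sum_eq
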